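-- pv_equiv track=rewrite | github.com/gaphex/Scavenger | get_threads.py | deduplicate_threads
-- ===== SOURCE A (Python) =====
-- from collections import defaultdict
--
-- def already_exists(seq, filtered_seqs, thr):
--     exists = False
--     for testseq in filtered_seqs:
--         if len(testseq) >= len(seq):
--             if seq[:thr] == testseq[:len(seq)][:thr]:
--                 exists = True
--     return exists
--
-- def deduplicate_threads(threads, thr):
--     ids = threads
--     start2id = defaultdict(list)
--     for i, k in enumerate(ids):
--         start2id[k[0]].append(i)
--
--     filtered = []
--     for k in start2id:
--         sub_filtered = []
--         for test_seq in sorted([ids[s] for s in start2id[k]],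
--                                key = lambda x: len(x))[::-1]:
--             if not already_exists(test_seq, sub_filtered, thr):
--                 sub_filtered.append(test_seq)
--         filtered += sub_filtered
--
--     return filtered
-- ===== SOURCE B (Python) =====
-- def deduplicate_threads(threads, thr):
--     # group sequences by first element, in first-appearance order
--     groups = {}
--     for seq in threads:
--         groups.setdefault(seq[0], []).append(seq)
--     out = []
--     for group in groups.values():
--         root = {}          # per-group prefix trie over the thr-keys of kept sequences
--         inserted = False   # whether any sequence has been kept in this group
--         for seq in sorted(group, key=len)[::-1]:
--             node, dup = root, inserted
--             for x in seq[:thr]: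
--                 child = node.get(x)
--                 if child is None:
--                     dup = False
--                     child = node[x] = {}
--                 node = child
--             if dup:
--                 continue
--             inserted = True
--             out.append(seq)
--     return out
-- ===== Notes on version B (the rewrite author's own statement) =====
-- stated objective: alternative
-- what changed: B groups sequences directly by first element (instead of A's index lists into threads) and replaces A's already_exists rescan of all kept sequences by a per-group prefix trie of nested dicts over the thr-keys, walked and extended in one pass per candidate.
import Mathlib
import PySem

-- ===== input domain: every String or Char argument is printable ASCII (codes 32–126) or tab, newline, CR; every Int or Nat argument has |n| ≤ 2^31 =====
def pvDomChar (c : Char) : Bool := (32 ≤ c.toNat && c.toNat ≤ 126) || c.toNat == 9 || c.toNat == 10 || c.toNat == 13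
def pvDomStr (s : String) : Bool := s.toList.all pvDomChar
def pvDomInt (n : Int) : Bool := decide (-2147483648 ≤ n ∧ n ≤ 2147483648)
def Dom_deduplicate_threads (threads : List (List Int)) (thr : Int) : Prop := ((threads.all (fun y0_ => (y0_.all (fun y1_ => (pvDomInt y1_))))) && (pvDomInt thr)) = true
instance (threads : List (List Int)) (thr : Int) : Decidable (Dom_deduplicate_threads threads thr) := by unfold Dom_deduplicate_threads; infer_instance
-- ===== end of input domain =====

-- B replaces A's nested already_exists rescan of the kept list by a per-group prefix trie over
-- the thr-keys of kept sequences, and groups sequences directly instead of through index lists.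

-- ===== PORT A =====
def already_exists (seq : List Int) (filtered_seqs : List (List Int)) (thr : Int) : Bool :=
  filtered_seqs.foldl (fun ex testseq =>
    if seq.length ≤ testseq.length then
      if PySem.List.slice seq none (some thr)
         == PySem.List.slice (PySem.List.slice testseq none (some (seq.length : Int))) none (some thr)
      then true else ex
    else ex) false

def deduplicate_threads (threads : List (List Int)) (thr : Int) : List (List Int) :=
  let ids := threads
  let start2id : PySem.Dict Int (List Int) :=
    (PySem.List.enumerate ids).foldl
      (fun d ik => d.modify ((PySem.List.pyGet? ik.2 0).getD 0) [] (fun l => l ++ [ik.1]))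
      PySem.Dict.empty
  start2id.keys.foldl (fun filtered k =>
    let group := (start2id.getD k []).map (fun s => (PySem.List.pyGet? ids s).getD [])
    let srt := (PySem.List.slice? (PySem.List.sorted group (fun x => x.length)) none none (-1)).getD []
    filtered ++ srt.foldl (fun sub t => if already_exists t sub thr then sub else sub ++ [t]) []) []

-- ===== PORT B =====
def deduplicate_threads_alt (threads : List (List Int)) (thr : Int) : List (List Int) :=
  let groups : PySem.Dict Int (List (List Int)) :=
    threads.foldl
      (fun d t => d.modify ((PySem.List.pyGet? t 0).getD 0) [] (fun l => l ++ [t]))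
      PySem.Dict.empty
  groups.items.foldl (fun out fg =>
    let srt := (PySem.List.slice? (PySem.List.sorted fg.2 (fun x => x.length)) none none (-1)).getD []
    (srt.foldl (fun (st : List (List Int) × PySem.Set (List Int) × Bool) seq =>
        -- Source B's nested-dict trie, node for node: a node is identified by its path from the
        -- root, the trie by the set of existing node paths; node.get(x) is None ⟷ the child
        -- path w.1 ++ [x] is not in the set, node[x] = {} is adding it (exact simulation)
        let walk := (PySem.List.slice seq none (some thr)).foldl
          (fun (w : List Int × Bool × PySem.Set (List Int)) x =>
            if PySem.Set.contains w.2.2 (w.1 ++ [x]) then (w.1 ++ [x], w.2.1, w.2.2)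
            else (w.1 ++ [x], false, PySem.Set.add w.2.2 (w.1 ++ [x])))
          ([], st.2.2, st.2.1)
        if walk.2.1 then st
        else (st.1 ++ [seq], walk.2.2, true))
      (out, (PySem.Set.empty : PySem.Set (List Int)), false)).1) []

-- ===== PRECONDITION & SPEC =====
-- Pre_ excludes inputs containing an empty sequence: there A (and B) raise IndexError on seq[0].
def Pre_deduplicate_threads (threads : List (List Int)) (thr : Int) : Prop :=
  ∀ t ∈ threads, t ≠ []
instance (threads : List (List Int)) (thr : Int) : Decidable (Pre_deduplicate_threads threads thr) := by
  unfold Pre_deduplicate_threads; infer_instance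
def pvWitness_deduplicate_threads : List (List Int) × Int := ([[1, 2, 3], [1, 2], [2, 5]], 2)

def Spec_deduplicate_threads (threads : List (List Int)) (thr : Int) (out : List (List Int)) : Prop := out = deduplicate_threads_alt threads thr
instance (threads : List (List Int)) (thr : Int) (out : List (List Int)) : Decidable (Spec_deduplicate_threads threads thr out) := by unfold Spec_deduplicate_threads; infer_instance

-- ===== CLAIM (what is proved, stated in full; the proofs are below) =====
def Claim_equal_deduplicate_threads : Prop := ∀ (threads : List (List Int)) (thr : Int), Dom_deduplicate_threads threads thr → Pre_deduplicate_threads threads thr → Spec_deduplicate_threads threads thr (deduplicate_threads threads thr)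

-- ===== LEMMAS AND PROOFS =====

-- the thr-key of a sequence: seq[:thr]
def pvKey (thr : Int) (t : List Int) : List Int := PySem.List.slice t none (some thr)
-- the grouping key: seq[0] (with the port's dummy default, unused under Pre_)
def pvHK (t : List Int) : Int := (PySem.List.pyGet? t 0).getD 0
-- A's per-group pass: descending-length order, nested-scan dedup
def pvProc (thr : Int) (g : List (List Int)) : List (List Int) :=
  ((PySem.List.sorted g (fun x => x.length)).reverse).foldl
    (fun sub t => if already_exists t sub thr then sub else sub ++ [t]) []

theorem pv_slice_none_some (xs : List Int) (b : Int) :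
    PySem.List.slice xs none (some b) = xs.take (PySem.List.clampIdx xs.length b) := by
  rcases b with n | n
  · rw [Int.ofNat_eq_natCast, PySem.List.slice_to xs (b := (n : Int)) (by positivity)]
    have h2 : PySem.List.clampIdx xs.length (n : Int) = min n xs.length := by
      simp only [PySem.List.clampIdx]
      rw [if_neg (by omega)]
      simp
    rw [h2, ← List.take_eq_take_min]
    simp
  · have h1 : (Int.negSucc n) = -((n + 1 : Nat) : Int) := by omega
    rw [h1, PySem.List.slice_to_neg_natCast xs (n + 1) (Nat.succ_pos n)]
    simp only [PySem.List.clampIdx]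
    rw [if_pos (by omega)]
    split_ifs with h2
    · congr 1; omega
    · congr 1; omega

theorem pv_clampIdx_le (n : Nat) (b : Int) : PySem.List.clampIdx n b ≤ n := by
  simp only [PySem.List.clampIdx]; split_ifs <;> omega

theorem pv_clampIdx_mono {n m : Nat} (b : Int) (h : n ≤ m) :
    PySem.List.clampIdx n b ≤ PySem.List.clampIdx m b := by
  simp only [PySem.List.clampIdx]; split_ifs <;> omega

theorem pv_key_length (thr : Int) (t : List Int) :
    (pvKey thr t).length = PySem.List.clampIdx t.length thr := by
  rw [pvKey, pv_slice_none_some, List.length_take]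
  exact Nat.min_eq_left (pv_clampIdx_le _ _)

-- A's comparison target, for a kept (longer) sequence, is a take of the kept key
theorem pv_cond_eq (thr : Int) (seq t : List Int) (h : seq.length ≤ t.length) :
    PySem.List.slice (PySem.List.slice t none (some (seq.length : Int))) none (some thr)
      = (pvKey thr t).take (pvKey thr seq).length := by
  have hin : PySem.List.slice t none (some (seq.length : Int)) = t.take seq.length := by
    rw [pv_slice_none_some]
    congr 1
    simp only [PySem.List.clampIdx]
    rw [if_neg (by omega)]
    omega
  rw [hin, pv_slice_none_some, pv_key_length, List.length_take, Nat.min_eq_left h,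
    List.take_take, pvKey, pv_slice_none_some, List.take_take]
  congr 1
  have h1 := pv_clampIdx_le seq.length thr
  have h2 := pv_clampIdx_mono (n := seq.length) (m := t.length) thr h
  omega

-- the A-side dedup accumulator only grows by appending
theorem pv_stepA_grows (thr : Int) (l : List (List Int)) (sub : List (List Int)) :
    ∃ e, l.foldl (fun sub t => if already_exists t sub thr then sub else sub ++ [t]) sub = sub ++ e := by
  induction l generalizing sub with
  | nil => exact ⟨[], by simp⟩
  | cons x l ih =>
    simp only [List.foldl_cons]
    split_ifs
    · exact ih sub
    · obtain ⟨e, he⟩ := ih (sub ++ [x])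
      exact ⟨[x] ++ e, by simpa using he⟩

-- already_exists as an ∃-test on the kept list
theorem pv_already_exists_iff (thr : Int) (seq : List Int) (sub : List (List Int))
    (hlen : ∀ t ∈ sub, seq.length ≤ t.length) :
    (already_exists seq sub thr = true) ↔
      ∃ t ∈ sub, pvKey thr seq = (pvKey thr t).take (pvKey thr seq).length := by
  unfold already_exists
  rw [PySem.List.foldl_congr_mem sub _
    (fun ex t => if ((pvKey thr seq == (pvKey thr t).take (pvKey thr seq).length) = true) then true else ex)
    false
    (by
      intro ex t ht
      rw [if_pos (hlen t ht), pv_cond_eq thr seq t (hlen t ht)]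
      rfl)]
  rw [PySem.List.foldl_if_true_eq]
  simp [List.any_eq_true]

-- the take-length of a key prefix can be normalised to the prefix's own length
theorem pv_take_norm (k kt : List Int) (i : Nat) (h : k = kt.take i) :
    k = kt.take k.length := by
  subst h
  rw [List.length_take, ← List.take_eq_take_min]

-- the node paths created while inserting rest below the node at path pre
def pvPrefixes : List Int → List Int → List (List Int)
  | _, [] => []
  | pre, x :: rest => (pre ++ [x]) :: pvPrefixes (pre ++ [x]) rest

theorem pv_mem_pvPrefixes : ∀ (rest pre : List Int) (p : List Int),
    p ∈ pvPrefixes pre rest ↔ ∃ i : Nat, 1 ≤ i ∧ i ≤ rest.length ∧ p = pre ++ rest.take i := by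
  intro rest
  induction rest with
  | nil => intro pre p; simp [pvPrefixes]
  | cons x rest ih =>
    intro pre p
    simp only [pvPrefixes, List.mem_cons, ih (pre ++ [x])]
    constructor
    · rintro (h | ⟨i, h1, h2, h3⟩)
      · exact ⟨1, by simp [h]⟩
      · refine ⟨i + 1, by omega, by simp only [List.length_cons]; omega, ?_⟩
        simp [h3, List.take_succ_cons]
    · rintro ⟨i, h1, h2, h3⟩
      rcases Nat.eq_or_lt_of_le h1 with h | h
      · left; simp [h3, ← h]
      · right
        refine ⟨i - 1, by omega, by simp at h2 ⊢; omega, ?_⟩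
        rw [h3, show i = (i - 1) + 1 from by omega, List.take_succ_cons]
        simp

-- walk, all children present: nothing changes but the position
theorem pv_walkW1 : ∀ (rest pre : List Int) (dup : Bool) (paths : PySem.Set (List Int)),
    (∀ i : Nat, 1 ≤ i → i ≤ rest.length → (pre ++ rest.take i) ∈ paths) →
    rest.foldl
      (fun (w : List Int × Bool × PySem.Set (List Int)) x =>
        if PySem.Set.contains w.2.2 (w.1 ++ [x]) then (w.1 ++ [x], w.2.1, w.2.2)
        else (w.1 ++ [x], false, PySem.Set.add w.2.2 (w.1 ++ [x])))
      (pre, dup, paths)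
    = (pre ++ rest, dup, paths) := by
  intro rest
  induction rest with
  | nil => intro pre dup paths _; simp
  | cons x rest ih =>
    intro pre dup paths hall
    have h1 : (pre ++ [x]) ∈ paths := by simpa using hall 1 le_rfl (by simp)
    simp only [List.foldl_cons]
    rw [if_pos ((PySem.Set.contains_iff _ _).mpr h1)]
    rw [ih (pre ++ [x]) dup paths (by
      intro i hi1 hi2
      have := hall (i + 1) (by omega) (by simp only [List.length_cons]; omega)
      simpa [List.take_succ_cons] using this)]
    simp

-- walk, no child present: the duplicate flag drops and every new path is added
theorem pv_walkW2 : ∀ (rest pre : List Int) (dup : Bool) (paths : PySem.Set (List Int)),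
    rest ≠ [] →
    (∀ i : Nat, 1 ≤ i → i ≤ rest.length → (pre ++ rest.take i) ∉ paths) →
    rest.foldl
      (fun (w : List Int × Bool × PySem.Set (List Int)) x =>
        if PySem.Set.contains w.2.2 (w.1 ++ [x]) then (w.1 ++ [x], w.2.1, w.2.2)
        else (w.1 ++ [x], false, PySem.Set.add w.2.2 (w.1 ++ [x])))
      (pre, dup, paths)
    = (pre ++ rest, false, PySem.Set.update paths (pvPrefixes pre rest)) := by
  intro rest
  induction rest with
  | nil => intro pre dup paths h; cases h rfl
  | cons x rest ih =>
    intro pre dup paths _ hnone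
    have h1 : (pre ++ [x]) ∉ paths := by simpa using hnone 1 le_rfl (by simp)
    simp only [List.foldl_cons]
    rw [if_neg (fun hc => h1 ((PySem.Set.contains_iff _ _).mp hc))]
    by_cases hrest : rest = []
    · subst hrest
      simp [pvPrefixes, PySem.Set.update]
    · rw [ih (pre ++ [x]) false (PySem.Set.add paths (pre ++ [x])) hrest (by
        intro i hi1 hi2
        rw [PySem.Set.mem_add]
        rintro (hmem | heq)
        · exact hnone (i + 1) (by omega) (by simp only [List.length_cons]; omega)
            (by simpa [List.take_succ_cons] using hmem)
        · have hlen := congrArg List.length heq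
          simp only [List.length_append, List.length_take, List.length_cons,
            List.length_nil] at hlen
          omega)]
      refine congrArg₂ _ (by simp) (congrArg₂ _ rfl ?_)
      simp [pvPrefixes, PySem.Set.update]

-- the whole trie walk for one candidate: the duplicate flag is A's already_exists test,
-- a duplicate leaves the trie untouched, a kept candidate extends the invariant
theorem pv_walk (thr : Int) (sub : List (List Int)) (trie : PySem.Set (List Int))
    (inserted : Bool) (c : List Int)
    (hinv : ∀ p : List Int, p ∈ trie ↔ (p ≠ [] ∧ ∃ t ∈ sub, p = (pvKey thr t).take p.length))
    (hins : inserted = true ↔ sub ≠ []) :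
    (((pvKey thr c).foldl
        (fun (w : List Int × Bool × PySem.Set (List Int)) x =>
          if PySem.Set.contains w.2.2 (w.1 ++ [x]) then (w.1 ++ [x], w.2.1, w.2.2)
          else (w.1 ++ [x], false, PySem.Set.add w.2.2 (w.1 ++ [x])))
        ([], inserted, trie)).2.1 = true
      ↔ ∃ t ∈ sub, pvKey thr c = (pvKey thr t).take (pvKey thr c).length)
    ∧ (((pvKey thr c).foldl
        (fun (w : List Int × Bool × PySem.Set (List Int)) x =>
          if PySem.Set.contains w.2.2 (w.1 ++ [x]) then (w.1 ++ [x], w.2.1, w.2.2)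
          else (w.1 ++ [x], false, PySem.Set.add w.2.2 (w.1 ++ [x])))
        ([], inserted, trie)).2.1 = false →
        ∀ p : List Int, p ∈ ((pvKey thr c).foldl
          (fun (w : List Int × Bool × PySem.Set (List Int)) x =>
            if PySem.Set.contains w.2.2 (w.1 ++ [x]) then (w.1 ++ [x], w.2.1, w.2.2)
            else (w.1 ++ [x], false, PySem.Set.add w.2.2 (w.1 ++ [x])))
          ([], inserted, trie)).2.2
          ↔ (p ≠ [] ∧ ∃ t ∈ sub ++ [c], p = (pvKey thr t).take p.length)) := by
  by_cases hall : ∀ i : Nat, 1 ≤ i → i ≤ (pvKey thr c).length → (pvKey thr c).take i ∈ trie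
  · -- every prefix of the key is already a node: the walk changes nothing
    rw [pv_walkW1 (pvKey thr c) [] inserted trie (by simpa using hall)]
    by_cases hk : (pvKey thr c).length = 0
    · have hkey : pvKey thr c = [] := List.length_eq_zero_iff.mp hk
      constructor
      · rw [hins, hkey]
        constructor
        · intro hne
          obtain ⟨t, ht⟩ := List.exists_mem_of_ne_nil _ hne
          exact ⟨t, ht, by simp⟩
        · rintro ⟨t, ht, _⟩ h; rw [h] at ht; cases ht
      · intro hfalse p
        have hsub : sub = [] := by
          by_contra hne
          rw [hins.mpr hne] at hfalse
          cases hfalse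
        subst hsub
        rw [hinv p]
        constructor
        · rintro ⟨_, t, ht, _⟩; cases ht
        · rintro ⟨hp, t, ht, hteq⟩
          rcases List.mem_singleton.mp (by simpa using ht) with rfl
          rw [hkey] at hteq
          simp at hteq
          exact absurd hteq hp
    · -- the full key is a node, so it is a prefix of a kept key and sub ≠ []
      have hfull : pvKey thr c ∈ trie := by
        have := hall (pvKey thr c).length (by omega) le_rfl
        rwa [List.take_length] at this
      obtain ⟨_, t, ht, hteq⟩ := (hinv _).mp hfull
      have hsub : sub ≠ [] := fun h => by rw [h] at ht; cases ht
      constructor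
      · simp only [hins.mpr hsub, true_iff]
        exact ⟨t, ht, hteq⟩
      · intro hfalse; rw [hins.mpr hsub] at hfalse; cases hfalse
  · -- some prefix is missing: find the first one, split the walk there
    have hex : ∃ i : Nat, 1 ≤ i ∧ i ≤ (pvKey thr c).length ∧ (pvKey thr c).take i ∉ trie := by
      simp only [not_forall] at hall
      obtain ⟨i, h1, h2, h3⟩ := hall
      exact ⟨i, h1, h2, h3⟩
    obtain ⟨i1, ⟨hi1a, hi1b, hi1c⟩, hi1min⟩ :=
      Nat.findX (p := fun i => 1 ≤ i ∧ i ≤ (pvKey thr c).length ∧ (pvKey thr c).take i ∉ trie) hex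
    have hpresent : ∀ i : Nat, 1 ≤ i → i < i1 → (pvKey thr c).take i ∈ trie := by
      intro i h1 h2
      by_contra hno
      exact hi1min i h2 ⟨h1, by omega, hno⟩
    have hmissing : ∀ i : Nat, i1 ≤ i → i ≤ (pvKey thr c).length → (pvKey thr c).take i ∉ trie := by
      intro i hge hle hmem
      obtain ⟨hne, t, ht, hteq⟩ := (hinv _).mp hmem
      apply hi1c
      refine (hinv _).mpr ⟨?_, t, ht, ?_⟩
      · intro h
        have hl := congrArg List.length h
        simp only [List.length_take, List.length_nil] at hl
        omega
      · have hlen1 : ((pvKey thr c).take i).length = i := by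
          rw [List.length_take]; omega
        have hlen2 : ((pvKey thr c).take i1).length = i1 := by
          rw [List.length_take]; omega
        rw [hlen2]
        calc (pvKey thr c).take i1 = ((pvKey thr c).take i).take i1 := by
              rw [List.take_take, Nat.min_eq_left hge]
          _ = ((pvKey thr t).take ((pvKey thr c).take i).length).take i1 := by rw [← hteq]
          _ = (pvKey thr t).take i1 := by
              rw [hlen1, List.take_take, Nat.min_eq_left hge]
    have hsplit : (pvKey thr c).foldl
        (fun (w : List Int × Bool × PySem.Set (List Int)) x =>
          if PySem.Set.contains w.2.2 (w.1 ++ [x]) then (w.1 ++ [x], w.2.1, w.2.2)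
          else (w.1 ++ [x], false, PySem.Set.add w.2.2 (w.1 ++ [x])))
        ([], inserted, trie)
        = (pvKey thr c, false,
            PySem.Set.update trie (pvPrefixes ((pvKey thr c).take (i1 - 1)) ((pvKey thr c).drop (i1 - 1)))) := by
      conv_lhs => rw [← List.take_append_drop (i1 - 1) (pvKey thr c)]
      rw [List.foldl_append]
      rw [pv_walkW1 ((pvKey thr c).take (i1 - 1)) [] inserted trie (by
        intro i h1 h2
        rw [List.length_take] at h2
        rw [List.take_take, Nat.min_eq_left (by omega)]
        exact hpresent i h1 (by omega))]
      rw [List.nil_append]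
      rw [pv_walkW2 ((pvKey thr c).drop (i1 - 1)) ((pvKey thr c).take (i1 - 1)) inserted trie
        (by
          intro h
          have := congrArg List.length h
          simp [List.length_drop] at this
          omega)
        (by
          intro i h1 h2
          rw [List.length_drop] at h2
          have htk : ((pvKey thr c).take (i1 - 1)).length = i1 - 1 := by
            rw [List.length_take]; omega
          rw [show (pvKey thr c).take (i1 - 1) ++ ((pvKey thr c).drop (i1 - 1)).take i
              = (pvKey thr c).take ((i1 - 1) + i) from List.take_add.symm]
          exact hmissing ((i1 - 1) + i) (by omega) (by omega))]
      rw [List.take_append_drop]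
    rw [hsplit]
    constructor
    · simp only [Bool.false_eq_true, false_iff]
      rintro ⟨t, ht, hteq⟩
      have hklen : 1 ≤ (pvKey thr c).length := by omega
      apply hmissing (pvKey thr c).length hi1b le_rfl
      rw [List.take_length]
      refine (hinv _).mpr ⟨?_, t, ht, hteq⟩
      intro h
      rw [h] at hklen
      simp at hklen
    · intro _ p
      rw [PySem.Set.mem_update, hinv p, pv_mem_pvPrefixes]
      constructor
      · rintro (⟨hne, t, ht, hteq⟩ | ⟨i, hia, hib, hic⟩)
        · exact ⟨hne, t, List.mem_append_left _ ht, hteq⟩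
        · rw [List.length_drop] at hib
          rw [show (pvKey thr c).take (i1 - 1) ++ ((pvKey thr c).drop (i1 - 1)).take i
              = (pvKey thr c).take ((i1 - 1) + i) from List.take_add.symm] at hic
          have hplen : p.length = (i1 - 1) + i := by
            rw [hic, List.length_take]; omega
          refine ⟨?_, c, List.mem_append_right _ (List.mem_singleton_self c), ?_⟩
          · intro h; rw [h] at hplen; simp at hplen; omega
          · exact pv_take_norm p (pvKey thr c) _ hic
      · rintro ⟨hne, t, ht, hteq⟩
        rcases List.mem_append.mp ht with ht' | ht'
        · exact Or.inl ⟨hne, t, ht', hteq⟩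
        · rw [List.mem_singleton.mp ht'] at hteq
          have hple : p.length ≤ (pvKey thr c).length := by
            by_contra h
            rw [List.take_of_length_le (by omega)] at hteq
            have := congrArg List.length hteq
            omega
          have hp1 : 1 ≤ p.length := by
            rcases Nat.eq_zero_or_pos p.length with h | h
            · exact absurd (List.length_eq_zero_iff.mp h) hne
            · omega
          rcases Nat.lt_or_ge p.length i1 with h | h
          · exact Or.inl ((hinv p).mp (hteq ▸ hpresent p.length hp1 h))
          · refine Or.inr ⟨p.length - (i1 - 1), by omega, ?_, ?_⟩
            · rw [List.length_drop]; omega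
            · rw [show (pvKey thr c).take (i1 - 1) ++ ((pvKey thr c).drop (i1 - 1)).take (p.length - (i1 - 1))
                  = (pvKey thr c).take ((i1 - 1) + (p.length - (i1 - 1))) from List.take_add.symm,
                show (i1 - 1) + (p.length - (i1 - 1)) = p.length from by omega]
              exact hteq

-- the core loop equivalence: A's nested scan = B's trie walk
theorem pv_inner_eq (thr : Int) (l : List (List Int))
    (hdesc : l.Pairwise (fun a b => b.length ≤ a.length)) :
    ∀ (sub out : List (List Int)) (trie : PySem.Set (List Int)) (inserted : Bool),
    (∀ t ∈ sub, ∀ s ∈ l, s.length ≤ t.length) →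
    (∀ p : List Int, p ∈ trie ↔ (p ≠ [] ∧ ∃ t ∈ sub, p = (pvKey thr t).take p.length)) →
    (inserted = true ↔ sub ≠ []) →
    (l.foldl (fun (st : List (List Int) × PySem.Set (List Int) × Bool) seq =>
        if ((PySem.List.slice seq none (some thr)).foldl
              (fun (w : List Int × Bool × PySem.Set (List Int)) x =>
                if PySem.Set.contains w.2.2 (w.1 ++ [x]) then (w.1 ++ [x], w.2.1, w.2.2)
                else (w.1 ++ [x], false, PySem.Set.add w.2.2 (w.1 ++ [x])))
              ([], st.2.2, st.2.1)).2.1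
        then st
        else (st.1 ++ [seq],
              ((PySem.List.slice seq none (some thr)).foldl
                (fun (w : List Int × Bool × PySem.Set (List Int)) x =>
                  if PySem.Set.contains w.2.2 (w.1 ++ [x]) then (w.1 ++ [x], w.2.1, w.2.2)
                  else (w.1 ++ [x], false, PySem.Set.add w.2.2 (w.1 ++ [x])))
                ([], st.2.2, st.2.1)).2.2,
              true))
      (out, trie, inserted)).1
    = out ++ (l.foldl (fun sub t => if already_exists t sub thr then sub else sub ++ [t]) sub).drop sub.length := by
  induction l with
  | nil => intro sub out trie inserted _ _ _; simp
  | cons x l ih =>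
    intro sub out trie inserted hlen hinv hins
    obtain ⟨hx, hdesc'⟩ := List.pairwise_cons.mp hdesc
    obtain ⟨hw1, hw3⟩ := pv_walk thr sub trie inserted x hinv hins
    have hae : (already_exists x sub thr = true) ↔
        (((PySem.List.slice x none (some thr)).foldl
          (fun (w : List Int × Bool × PySem.Set (List Int)) y =>
            if PySem.Set.contains w.2.2 (w.1 ++ [y]) then (w.1 ++ [y], w.2.1, w.2.2)
            else (w.1 ++ [y], false, PySem.Set.add w.2.2 (w.1 ++ [y])))
          ([], inserted, trie)).2.1 = true) := by
      rw [pv_already_exists_iff thr x sub (fun t ht => hlen t ht x List.mem_cons_self)]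
      exact hw1.symm
    simp only [List.foldl_cons]
    by_cases hdup : ((PySem.List.slice x none (some thr)).foldl
        (fun (w : List Int × Bool × PySem.Set (List Int)) y =>
          if PySem.Set.contains w.2.2 (w.1 ++ [y]) then (w.1 ++ [y], w.2.1, w.2.2)
          else (w.1 ++ [y], false, PySem.Set.add w.2.2 (w.1 ++ [y])))
        ([], inserted, trie)).2.1 = true
    · rw [if_pos hdup, if_pos (hae.mpr hdup)]
      exact ih hdesc' sub out trie inserted
        (fun t ht s hs => hlen t ht s (List.mem_cons_of_mem _ hs)) hinv hins
    · rw [if_neg hdup, if_neg (fun h => hdup (hae.mp h))]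
      have hinv' : ∀ p : List Int, p ∈ ((PySem.List.slice x none (some thr)).foldl
          (fun (w : List Int × Bool × PySem.Set (List Int)) y =>
            if PySem.Set.contains w.2.2 (w.1 ++ [y]) then (w.1 ++ [y], w.2.1, w.2.2)
            else (w.1 ++ [y], false, PySem.Set.add w.2.2 (w.1 ++ [y])))
          ([], inserted, trie)).2.2
          ↔ (p ≠ [] ∧ ∃ t ∈ sub ++ [x], p = (pvKey thr t).take p.length) :=
        hw3 (Bool.eq_false_iff.mpr hdup)
      have hlen' : ∀ t ∈ sub ++ [x], ∀ s ∈ l, s.length ≤ t.length := by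
        intro t ht s hs
        rcases List.mem_append.mp ht with ht' | ht'
        · exact hlen t ht' s (List.mem_cons_of_mem _ hs)
        · rw [List.mem_singleton.mp ht']; exact hx s hs
      rw [ih hdesc' (sub ++ [x]) (out ++ [x]) _ true hlen' hinv' (by simp)]
      obtain ⟨e, he⟩ := pv_stepA_grows thr l (sub ++ [x])
      have h1 : List.drop (sub ++ [x]).length (sub ++ [x] ++ e) = e := List.drop_left
      have h2 : List.drop sub.length (sub ++ [x] ++ e) = [x] ++ e := by
        rw [show sub ++ [x] ++ e = sub ++ ([x] ++ e) from by simp]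
        exact List.drop_left
      rw [he, h1, h2]
      simp

-- enumerate: second components are the list itself
theorem pv_enum_snd (xs : List (List Int)) (s : Int) :
    (PySem.List.enumerate xs s).map (fun p => p.2) = xs := by
  induction xs generalizing s with
  | nil => rfl
  | cons x t ih => simp [PySem.List.enumerate, ih]

-- enumerate: every pair indexes its element
theorem pv_enum_get (xs : List (List Int)) (s : Int) :
    ∀ p ∈ PySem.List.enumerate xs s, ∃ n : Nat, p.1 = s + n ∧ xs[n]? = some p.2 := by
  induction xs generalizing s with
  | nil => intro p hp; cases hp
  | cons x t ih =>
    intro p hp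
    rcases (by simpa [PySem.List.enumerate] using hp : p = (s, x) ∨ p ∈ PySem.List.enumerate t (s + 1)) with h | h
    · exact ⟨0, by simp [h]⟩
    · obtain ⟨n, hn1, hn2⟩ := ih (s + 1) p h
      exact ⟨n + 1, by omega, by simpa using hn2⟩

-- enumerate: a filter on the element followed by projection is a filter on the list
theorem pv_enum_filter_map (xs : List (List Int)) (s : Int) (q : List Int → Bool) :
    ((PySem.List.enumerate xs s).filter (fun p => q p.2)).map (fun p => p.2) = xs.filter q := by
  induction xs generalizing s with
  | nil => rfl
  | cons x t ih =>
    by_cases h : q x = true <;> simp [PySem.List.enumerate, h, ih]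

-- both dict folds have the same keys, and their groups are the filtered sublists
theorem pv_A_keys (threads : List (List Int)) :
    ((PySem.List.enumerate threads).foldl
      (fun d ik => d.modify ((PySem.List.pyGet? ik.2 0).getD 0) [] (fun l => l ++ [ik.1]))
      (PySem.Dict.empty : PySem.Dict Int (List Int))).keys
      = PySem.Set.ofList (threads.map pvHK) := by
  rw [PySem.Dict.keys_foldl_modify_key (PySem.List.enumerate threads)
    (fun ik => (PySem.List.pyGet? ik.2 0).getD 0) [] (fun _ ik => fun l => l ++ [ik.1]) PySem.Dict.empty]
  rw [PySem.Dict.keys_empty]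
  have hm : (PySem.List.enumerate threads).map (fun ik => (PySem.List.pyGet? ik.2 0).getD 0)
      = threads.map pvHK := by
    conv_rhs => rw [← pv_enum_snd threads 0]
    rw [List.map_map]
    rfl
  rw [hm, PySem.Set.ofList_eq_foldl]
  rfl

theorem pv_A_group (threads : List (List Int)) (k : Int) :
    (((PySem.List.enumerate threads).foldl
      (fun d ik => d.modify ((PySem.List.pyGet? ik.2 0).getD 0) [] (fun l => l ++ [ik.1]))
      (PySem.Dict.empty : PySem.Dict Int (List Int))).getD k []).map
      (fun s => (PySem.List.pyGet? threads s).getD [])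
      = threads.filter (fun t => pvHK t == k) := by
  rw [show ((PySem.List.enumerate threads).foldl
      (fun d ik => d.modify ((PySem.List.pyGet? ik.2 0).getD 0) [] (fun l => l ++ [ik.1]))
      (PySem.Dict.empty : PySem.Dict Int (List Int)))
    = (((PySem.List.enumerate threads).map (fun ik => ((PySem.List.pyGet? ik.2 0).getD 0, ik.1))).foldl
      (fun d p => d.modify p.1 [] (fun l => l ++ [p.2])) PySem.Dict.empty) from by rw [List.foldl_map]]
  rw [PySem.Dict.getD_foldl_modify_append, PySem.Dict.getD_empty, List.nil_append]
  rw [List.filter_map, List.map_map, List.map_map]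
  simp only [Function.comp_def]
  have hcongr : ∀ p ∈ (PySem.List.enumerate threads).filter
      (fun ik => (PySem.List.pyGet? ik.2 0).getD 0 == k),
      (fun (ik : Int × List Int) => (PySem.List.pyGet? threads ik.1).getD []) p = p.2 := by
    intro p hp
    obtain ⟨n, hn1, hn2⟩ := pv_enum_get threads 0 p (List.mem_of_mem_filter hp)
    simp only []
    rw [show p.1 = (n : Int) from by omega, PySem.List.pyGet?_natCast, hn2]
    rfl
  rw [List.map_congr_left hcongr]
  exact pv_enum_filter_map threads 0 (fun t => pvHK t == k)

-- A's program as a fold over first-element keys of filtered groups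
theorem pv_A_eq (threads : List (List Int)) (thr : Int) :
    deduplicate_threads threads thr
      = (PySem.Set.ofList (threads.map pvHK)).foldl
          (fun acc k => acc ++ pvProc thr (threads.filter (fun t => pvHK t == k))) [] := by
  simp only [deduplicate_threads, PySem.List.slice?_none_none_neg_one, Option.getD_some]
  rw [pv_A_keys]
  apply PySem.List.foldl_congr_mem
  intro acc k _
  rw [pv_A_group threads k]
  rfl

theorem pv_B_keys (threads : List (List Int)) :
    (threads.foldl
      (fun d t => d.modify ((PySem.List.pyGet? t 0).getD 0) [] (fun l => l ++ [t]))
      (PySem.Dict.empty : PySem.Dict Int (List (List Int)))).keys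
      = PySem.Set.ofList (threads.map pvHK) := by
  rw [PySem.Dict.keys_foldl_modify_key threads
    (fun t => (PySem.List.pyGet? t 0).getD 0) [] (fun _ t => fun l => l ++ [t]) PySem.Dict.empty]
  rw [PySem.Dict.keys_empty, PySem.Set.ofList_eq_foldl]
  rfl

theorem pv_B_group (threads : List (List Int)) (k : Int) :
    (threads.foldl
      (fun d t => d.modify ((PySem.List.pyGet? t 0).getD 0) [] (fun l => l ++ [t]))
      (PySem.Dict.empty : PySem.Dict Int (List (List Int)))).getD k []
      = threads.filter (fun t => pvHK t == k) := by
  rw [show (threads.foldl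
      (fun d t => d.modify ((PySem.List.pyGet? t 0).getD 0) [] (fun l => l ++ [t]))
      (PySem.Dict.empty : PySem.Dict Int (List (List Int))))
    = ((threads.map (fun t => ((PySem.List.pyGet? t 0).getD 0, t))).foldl
      (fun d p => d.modify p.1 [] (fun l => l ++ [p.2])) PySem.Dict.empty) from by rw [List.foldl_map]]
  rw [PySem.Dict.getD_foldl_modify_append, PySem.Dict.getD_empty, List.nil_append]
  rw [List.filter_map, List.map_map]
  simp only [Function.comp_def]
  simp only [List.map_id']
  rfl

-- B's program as the same fold with the prefix-set inner pass
theorem pv_B_eq (threads : List (List Int)) (thr : Int) :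
    deduplicate_threads_alt threads thr
      = (PySem.Set.ofList (threads.map pvHK)).foldl
          (fun acc k => acc ++ pvProc thr (threads.filter (fun t => pvHK t == k))) [] := by
  simp only [deduplicate_threads_alt]
  have hnodup : (threads.foldl
      (fun d t => d.modify ((PySem.List.pyGet? t 0).getD 0) [] (fun l => l ++ [t]))
      (PySem.Dict.empty : PySem.Dict Int (List (List Int)))).keys.Nodup :=
    PySem.Dict.nodup_keys_foldl_modify_key threads _ _ _ _ (by simp [PySem.Dict.keys_empty])
  rw [PySem.Dict.items_eq_map_keys _ hnodup [], List.foldl_map, pv_B_keys]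
  apply PySem.List.foldl_congr_mem
  intro acc k _
  simp only [PySem.List.slice?_none_none_neg_one, Option.getD_some, pv_B_group threads k]
  rw [pv_inner_eq thr ((PySem.List.sorted (threads.filter (fun t => pvHK t == k)) (fun x => x.length)).reverse)
    (List.pairwise_reverse.mpr (PySem.List.sorted_pairwise _ _)) [] acc PySem.Set.empty false
    (by intro t ht; cases ht)
    (by intro p; constructor
        · intro hp; cases hp
        · rintro ⟨_, t, ht, _⟩; cases ht)
    (by simp)]
  simp only [List.length_nil, List.drop_zero, pvProc]

-- ===== VERDICT (by name: the statement is the Claim_ definition above) =====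
theorem deduplicate_threads_spec : Claim_equal_deduplicate_threads := by
  intro threads thr _ _
  unfold Spec_deduplicate_threads
  rw [pv_A_eq, pv_B_eq]
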